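-- pv_equiv track=rewrite | github.com/benquick123/code-profiling | code/batch-1/vse-naloge-brez-testov/DN7-M-69.py | varen_premik
-- ===== SOURCE A (Python) =====
-- def varen_premik(x0, y0, x1, y1, mine):
--     """
--     Vrni `True`, če je pomik z (x0, y0) and (x1, y1) varen, `False`, če ni.
--
--     Args:
--         x0 (int): koordinata x začetnega polja
--         y0 (int): koordinata y začetnega polja
--         x1 (int): koordinata x končnega polja
--         y1 (int): koordinata y končnega polja
--         mine (set of tuple of int): koordinate min
--
--     Returns:
--         bool: `True`, če je premik varen, `False`, če ni.
--     """
--     if x0 == x1: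
--         for currY in range(min(y0, y1), max(y0, y1)+1):
--             if (x0, currY) in mine:
--                 return False
--     else:
--         for currX in range(min(x0, x1), max(x0, x1)+1):
--             if (currX, y0) in mine:
--                 return False
--     return True
-- ===== SOURCE B (Python) =====
-- def varen_premik(x0, y0, x1, y1, mine):
--     if x0 == x1:
--         lo, hi = min(y0, y1), max(y0, y1)
--         return not any(mx == x0 and lo <= my <= hi for (mx, my) in mine)
--     lo, hi = min(x0, x1), max(x0, x1)
--     return not any(my == y0 and lo <= mx <= hi for (mx, my) in mine)
-- ===== Notes on version B (the rewrite author's own statement) =====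
-- stated objective: alternative
-- what changed: B scans the mine set once, testing each mine against the fixed coordinate and the inclusive span of the move, instead of A's walk over every cell of the path with a membership test per cell.
import Mathlib
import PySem

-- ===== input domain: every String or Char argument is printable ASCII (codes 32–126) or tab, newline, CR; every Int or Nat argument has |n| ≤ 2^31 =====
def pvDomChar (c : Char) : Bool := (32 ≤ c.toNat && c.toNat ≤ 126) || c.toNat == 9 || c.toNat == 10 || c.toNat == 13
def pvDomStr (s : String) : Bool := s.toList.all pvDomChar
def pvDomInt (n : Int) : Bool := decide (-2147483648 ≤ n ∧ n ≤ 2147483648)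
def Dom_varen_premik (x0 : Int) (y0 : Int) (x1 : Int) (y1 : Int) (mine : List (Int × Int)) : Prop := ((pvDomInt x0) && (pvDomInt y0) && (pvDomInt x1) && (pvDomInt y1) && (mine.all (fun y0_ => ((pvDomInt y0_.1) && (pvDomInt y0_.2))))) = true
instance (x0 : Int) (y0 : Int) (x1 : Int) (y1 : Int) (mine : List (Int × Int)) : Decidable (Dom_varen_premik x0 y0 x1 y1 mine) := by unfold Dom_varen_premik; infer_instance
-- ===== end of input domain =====

-- ===== PORT A =====
-- B loops over the mine set instead of over the cells of the move; same return value, alternative decomposition.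
-- early-returning for-loop of A: walk the cells, return False on the first cell that is a mine
def pvWalk (pred : Int → Bool) : List Int → Bool
  | [] => true
  | c :: rest => if pred c then false else pvWalk pred rest

def varen_premik (x0 : Int) (y0 : Int) (x1 : Int) (y1 : Int) (mine : List (Int × Int)) : Bool :=
  if x0 = x1 then
    pvWalk (fun currY => mine.contains (x0, currY)) (PySem.List.pyRange (min y0 y1) (max y0 y1 + 1) 1)
  else
    pvWalk (fun currX => mine.contains (currX, y0)) (PySem.List.pyRange (min x0 x1) (max x0 x1 + 1) 1)

-- ===== PORT B =====
def varen_premik_alt (x0 : Int) (y0 : Int) (x1 : Int) (y1 : Int) (mine : List (Int × Int)) : Bool :=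
  if x0 = x1 then
    ! mine.any (fun p => p.1 == x0 && decide (min y0 y1 ≤ p.2) && decide (p.2 ≤ max y0 y1))
  else
    ! mine.any (fun p => p.2 == y0 && decide (min x0 x1 ≤ p.1) && decide (p.1 ≤ max x0 x1))

-- ===== PRECONDITION & SPEC =====
def Spec_varen_premik (x0 : Int) (y0 : Int) (x1 : Int) (y1 : Int) (mine : List (Int × Int)) (out : Bool) : Prop := out = varen_premik_alt x0 y0 x1 y1 mine
instance (x0 : Int) (y0 : Int) (x1 : Int) (y1 : Int) (mine : List (Int × Int)) (out : Bool) : Decidable (Spec_varen_premik x0 y0 x1 y1 mine out) := by unfold Spec_varen_premik; infer_instance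

-- ===== CLAIM (what is proved, stated in full; the proofs are below) =====
def Claim_equal_varen_premik : Prop := ∀ (x0 : Int) (y0 : Int) (x1 : Int) (y1 : Int) (mine : List (Int × Int)), Dom_varen_premik x0 y0 x1 y1 mine → Spec_varen_premik x0 y0 x1 y1 mine (varen_premik x0 y0 x1 y1 mine)

-- ===== LEMMAS AND PROOFS =====
lemma pvWalk_eq_not_any (pred : Int → Bool) (xs : List Int) :
    pvWalk pred xs = ! xs.any pred := by
  induction xs with
  | nil => rfl
  | cons c rest ih => by_cases h : pred c <;> simp [pvWalk, h, ih]

lemma any_range_eq_any_mine (x0 lo hi : Int) (mine : List (Int × Int)) :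
    ((PySem.List.pyRange lo (hi + 1) 1).any (fun y => mine.contains (x0, y)))
      = mine.any (fun p => p.1 == x0 && decide (lo ≤ p.2) && decide (p.2 ≤ hi)) := by
  apply Bool.eq_iff_iff.mpr
  simp only [List.any_eq_true, PySem.List.mem_pyRange_one, List.contains_iff_mem,
    Bool.and_eq_true, beq_iff_eq, decide_eq_true_eq]
  constructor
  · rintro ⟨y, ⟨h1, h2⟩, hm⟩
    exact ⟨(x0, y), hm, ⟨rfl, h1⟩, by omega⟩
  · rintro ⟨⟨a, b⟩, hm, ⟨h1, h2⟩, h3⟩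
    subst h1
    exact ⟨b, ⟨h2, by omega⟩, hm⟩

lemma any_range_eq_any_mine' (y0 lo hi : Int) (mine : List (Int × Int)) :
    ((PySem.List.pyRange lo (hi + 1) 1).any (fun x => mine.contains (x, y0)))
      = mine.any (fun p => p.2 == y0 && decide (lo ≤ p.1) && decide (p.1 ≤ hi)) := by
  apply Bool.eq_iff_iff.mpr
  simp only [List.any_eq_true, PySem.List.mem_pyRange_one, List.contains_iff_mem,
    Bool.and_eq_true, beq_iff_eq, decide_eq_true_eq]
  constructor
  · rintro ⟨x, ⟨h1, h2⟩, hm⟩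
    exact ⟨(x, y0), hm, ⟨rfl, h1⟩, by omega⟩
  · rintro ⟨⟨a, b⟩, hm, ⟨h1, h2⟩, h3⟩
    subst h1
    exact ⟨a, ⟨h2, by omega⟩, hm⟩

-- ===== VERDICT =====
theorem varen_premik_spec : Claim_equal_varen_premik := by
  intro x0 y0 x1 y1 mine _
  unfold Spec_varen_premik varen_premik varen_premik_alt
  by_cases h : x0 = x1 <;>
    simp only [h, if_false, pvWalk_eq_not_any,
      any_range_eq_any_mine, any_range_eq_any_mine']
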